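-- pv_equiv track=rewrite | github.com/teamworkanalytics75/Legal | scripts/postprocess.py | build_case_catalog
-- ===== SOURCE A (Python) =====
-- from typing import Dict, List, Any, Tuple
--
-- def build_case_catalog(search_results: List[Dict[str, Any]]) -> List[Tuple[str, str, str, str, str]]:
--     """
--     Build a catalog of candidate cases from search results.
--     """
--     catalog = []
--     seen_domains = set()
--
--     for result in search_results:
--         url = result.get("href", "")
--         domain = result.get("domain", "")
--         if not url or domain in seen_domains:
--             continue
--
--         title = result.get("title", "Unnamed Case")
--         snippet = result.get("body", "")
--         mapped_domain = domain.replace("www.", "")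
--
--         catalog.append(
--             (
--                 title,
--                 mapped_domain,
--                 result.get("query", ""),
--                 snippet[:200].replace("\n", " "),
--                 url,
--             )
--         )
--         seen_domains.add(domain)
--
--         if len(catalog) >= 6:
--             break
--
--     return catalog
-- ===== SOURCE B (Python) =====
-- def build_case_catalog(search_results):
--     # Index the first valid record per domain: dict insertion order gives first-occurrence order,
--     # so no separate seen-set or catalog accumulator is needed.
--     by_domain = {}
--     for r in search_results:
--         if r.get("href", ""):
--             by_domain.setdefault(r.get("domain", ""), r)
--     return [
--         (
--             r.get("title", "Unnamed Case"),
--             r.get("domain", "").replace("www.", ""),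
--             r.get("query", ""),
--             r.get("body", "")[:200].replace("\n", " "),
--             r.get("href", ""),
--         )
--         for r in list(by_domain.values())[:6]
--     ]
-- ===== Notes on version B (the rewrite author's own statement) =====
-- stated objective: alternative
-- what changed: Replaces A's fused loop maintaining a catalog list plus a seen-domains set with an early break at 6 by a domain-indexed dict built with setdefault (insertion order gives first-occurrence dedup for free), whose first six values are then formatted by a comprehension.
import Mathlib
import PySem

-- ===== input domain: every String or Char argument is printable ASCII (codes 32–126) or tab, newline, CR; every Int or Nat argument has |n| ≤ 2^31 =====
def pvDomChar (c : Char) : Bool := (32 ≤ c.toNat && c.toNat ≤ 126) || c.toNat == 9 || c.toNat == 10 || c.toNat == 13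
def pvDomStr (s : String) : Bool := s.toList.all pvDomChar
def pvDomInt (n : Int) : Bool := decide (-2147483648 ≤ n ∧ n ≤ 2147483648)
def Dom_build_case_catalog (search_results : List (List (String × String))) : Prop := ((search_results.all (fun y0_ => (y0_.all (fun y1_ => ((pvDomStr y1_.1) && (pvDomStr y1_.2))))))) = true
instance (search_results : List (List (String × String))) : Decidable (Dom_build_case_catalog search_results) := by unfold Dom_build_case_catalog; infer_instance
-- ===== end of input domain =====

-- B replaces A's fused loop (catalog list + seen set + early break at 6) by a domain-indexed
-- dict built with setdefault, then formats its first six values (alternative decomposition).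

-- ===== PORT A =====
def goA : List (List (String × String)) → List (String × String × String × String × String) → PySem.Set String → List (String × String × String × String × String)
  | [], catalog, _ => catalog
  | r :: rest, catalog, seen =>
    let url := PySem.Dict.getD (PySem.Dict.mk r) "href" ""
    let domain := PySem.Dict.getD (PySem.Dict.mk r) "domain" ""
    if url == "" || PySem.Set.contains seen domain then goA rest catalog seen
    else
      let title := PySem.Dict.getD (PySem.Dict.mk r) "title" "Unnamed Case"
      let snippet := PySem.Dict.getD (PySem.Dict.mk r) "body" ""
      let mapped_domain := PySem.Str.replace domain "www." ""
      let catalog' := catalog ++ [(title, mapped_domain, PySem.Dict.getD (PySem.Dict.mk r) "query" "",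
        PySem.Str.replace (PySem.Str.slice snippet none (some 200)) "\n" " ", url)]
      let seen' := PySem.Set.add seen domain
      if 6 ≤ catalog'.length then catalog' else goA rest catalog' seen'

def build_case_catalog (search_results : List (List (String × String))) : List (String × String × String × String × String) :=
  goA search_results [] PySem.Set.empty

-- ===== PORT B =====
-- Pass 1: index the first record per domain (non-empty href) with setdefault.
def indexByDomain : List (List (String × String)) → PySem.Dict String (List (String × String)) → PySem.Dict String (List (String × String))
  | [], d => d
  | r :: rest, d =>
    if PySem.Dict.getD (PySem.Dict.mk r) "href" "" != "" then
      indexByDomain rest (PySem.Dict.setdefault d (PySem.Dict.getD (PySem.Dict.mk r) "domain" "") r)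
    else indexByDomain rest d

-- Pass 2: the formatter applied in the comprehension.
def fmtResult (r : List (String × String)) : String × String × String × String × String :=
  (PySem.Dict.getD (PySem.Dict.mk r) "title" "Unnamed Case",
   PySem.Str.replace (PySem.Dict.getD (PySem.Dict.mk r) "domain" "") "www." "",
   PySem.Dict.getD (PySem.Dict.mk r) "query" "",
   PySem.Str.replace (PySem.Str.slice (PySem.Dict.getD (PySem.Dict.mk r) "body" "") none (some 200)) "\n" " ",
   PySem.Dict.getD (PySem.Dict.mk r) "href" "")

def build_case_catalog_alt (search_results : List (List (String × String))) : List (String × String × String × String × String) :=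
  (PySem.List.slice (PySem.Dict.values (indexByDomain search_results PySem.Dict.empty)) none (some 6)).map fmtResult

-- ===== PRECONDITION & SPEC =====
def Spec_build_case_catalog (search_results : List (List (String × String))) (out : List (String × String × String × String × String)) : Prop := out = build_case_catalog_alt search_results
instance (search_results : List (List (String × String))) (out : List (String × String × String × String × String)) : Decidable (Spec_build_case_catalog search_results out) := by unfold Spec_build_case_catalog; infer_instance

-- ===== CLAIM (what is proved, stated in full; the proofs are below) =====
def Claim_equal_build_case_catalog : Prop := ∀ (search_results : List (List (String × String))), Dom_build_case_catalog search_results → Spec_build_case_catalog search_results (build_case_catalog search_results)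

-- ===== LEMMAS AND PROOFS =====
-- Proof-side intermediate: first-per-domain dedup of the raw results under a seen set.
def dedupCandidates : List (List (String × String)) → PySem.Set String → List (List (String × String))
  | [], _ => []
  | r :: rest, seen =>
    if PySem.Dict.getD (PySem.Dict.mk r) "href" "" != "" && !(PySem.Set.contains seen (PySem.Dict.getD (PySem.Dict.mk r) "domain" "")) then
      r :: dedupCandidates rest (PySem.Set.add seen (PySem.Dict.getD (PySem.Dict.mk r) "domain" ""))
    else dedupCandidates rest seen

lemma goA_eq (rs : List (List (String × String))) :
    ∀ (seen : PySem.Set String) (catalog : List (String × String × String × String × String)),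
    catalog.length < 6 →
    goA rs catalog seen = catalog ++ ((dedupCandidates rs seen).take (6 - catalog.length)).map fmtResult := by
  induction rs with
  | nil => intro seen catalog _; simp [goA, dedupCandidates]
  | cons r rest ih =>
    intro seen catalog hlen
    by_cases hg : (PySem.Dict.getD (PySem.Dict.mk r) "href" "" == "" || PySem.Set.contains seen (PySem.Dict.getD (PySem.Dict.mk r) "domain" "")) = true
    · have hg' : (PySem.Dict.getD (PySem.Dict.mk r) "href" "" != "" && !(PySem.Set.contains seen (PySem.Dict.getD (PySem.Dict.mk r) "domain" ""))) = false := by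
        simp at hg
        simp [bne]
        tauto
      simp only [goA, dedupCandidates, hg, hg', if_true, if_false, Bool.false_eq_true]
      exact ih seen catalog hlen
    · have hg' : (PySem.Dict.getD (PySem.Dict.mk r) "href" "" != "" && !(PySem.Set.contains seen (PySem.Dict.getD (PySem.Dict.mk r) "domain" ""))) = true := by
        simp at hg
        simp [bne]
        tauto
      simp only [goA, dedupCandidates, hg, hg', if_true, if_false, Bool.false_eq_true]
      by_cases hfull : catalog.length + 1 = 6
      · have h6 : 6 - catalog.length = 1 := by omega
        simp [hfull, h6, fmtResult]
      · have hlt : (catalog ++ [fmtResult r]).length < 6 := by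
          simp; omega
        have h6 : 6 - catalog.length = (6 - (catalog.length + 1)) + 1 := by omega
        have := ih (PySem.Set.add seen (PySem.Dict.getD (PySem.Dict.mk r) "domain" "")) (catalog ++ [fmtResult r]) hlt
        simp only [List.length_append, List.length_cons, List.length_nil] at this ⊢
        rw [if_neg (by simpa using (by omega : ¬ 6 ≤ catalog.length + 1))]
        rw [show (catalog ++ [(PySem.Dict.getD (PySem.Dict.mk r) "title" "Unnamed Case",
          PySem.Str.replace (PySem.Dict.getD (PySem.Dict.mk r) "domain" "") "www." "",
          PySem.Dict.getD (PySem.Dict.mk r) "query" "",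
          PySem.Str.replace (PySem.Str.slice (PySem.Dict.getD (PySem.Dict.mk r) "body" "") none (some 200)) "\n" " ",
          PySem.Dict.getD (PySem.Dict.mk r) "href" "")]) = catalog ++ [fmtResult r] from rfl]
        rw [this, h6, List.take_succ_cons]
        simp [fmtResult]

lemma index_values (rs : List (List (String × String))) :
    ∀ (d : PySem.Dict String (List (String × String))) (seen : PySem.Set String),
    (∀ k, PySem.Set.contains seen k = PySem.Dict.contains d k) →
    PySem.Dict.values (indexByDomain rs d) = PySem.Dict.values d ++ dedupCandidates rs seen := by
  induction rs with
  | nil => intro d seen _; simp [indexByDomain, dedupCandidates]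
  | cons r rest ih =>
    intro d seen hinv
    by_cases hhref : (PySem.Dict.getD (PySem.Dict.mk r) "href" "" != "") = true
    · set key := PySem.Dict.getD (PySem.Dict.mk r) "domain" "" with hkey
      by_cases hseen : PySem.Set.contains seen key = true
      · have hcont : PySem.Dict.contains d key = true := (hinv key) ▸ hseen
        have hguard : (PySem.Dict.getD (PySem.Dict.mk r) "href" "" != "" && !(PySem.Set.contains seen key)) = false := by
          rw [hseen]; simp
        simp only [indexByDomain, dedupCandidates, ← hkey]
        rw [if_pos hhref, if_neg (by rw [hguard]; simp)]
        rw [PySem.Dict.setdefault_of_contains _ _ hcont]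
        exact ih d seen hinv
      · have hcont : PySem.Dict.contains d key = false := by
          have := hinv key; rw [← this]; simpa using hseen
        have hseenF : PySem.Set.contains seen key = false := by simpa using hseen
        have hguard : (PySem.Dict.getD (PySem.Dict.mk r) "href" "" != "" && !(PySem.Set.contains seen key)) = true := by
          rw [hseenF, hhref]; simp
        simp only [indexByDomain, dedupCandidates, ← hkey]
        rw [if_pos hhref, if_pos hguard]
        rw [PySem.Dict.setdefault_of_not_contains _ _ hcont]
        have hinv' : ∀ k, PySem.Set.contains (PySem.Set.add seen key) k = PySem.Dict.contains (PySem.Dict.insert d key r) k := by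
          intro k
          rw [PySem.Dict.contains_insert, ← hinv k]
          simp only [PySem.Set.add, hseenF, Bool.false_eq_true, if_false]
          by_cases hk : k = key
          · subst hk; simp [PySem.Set.contains]
          · simp [PySem.Set.contains, hk]
        rw [ih (PySem.Dict.insert d key r) (PySem.Set.add seen key) hinv']
        rw [show PySem.Dict.values (PySem.Dict.insert d key r) = PySem.Dict.values d ++ [r] by
          simp [PySem.Dict.values, PySem.Dict.items_insert_of_not_contains _ _ hcont]]
        simp
    · have hhrefF : (PySem.Dict.getD (PySem.Dict.mk r) "href" "" != "") = false := by simpa using hhref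
      simp only [indexByDomain, dedupCandidates]
      rw [if_neg (by rw [hhrefF]; simp), if_neg (by rw [hhrefF]; simp)]
      exact ih d seen hinv

-- ===== VERDICT (by name: the statement is the Claim_ definition above) =====
theorem build_case_catalog_spec : Claim_equal_build_case_catalog := by
  intro rs _
  unfold Spec_build_case_catalog build_case_catalog build_case_catalog_alt
  rw [goA_eq rs PySem.Set.empty [] (by simp)]
  rw [index_values rs PySem.Dict.empty PySem.Set.empty (by intro k; simp [PySem.Set.contains, PySem.Set.empty, PySem.Dict.empty])]
  simp [PySem.List.slice_to, PySem.Dict.values, PySem.Dict.empty]
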